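-- pv_equiv track=rewrite | github.com/siyer2018/python_projects | python/proj09.py | get_tags_by_month_for_users
-- ===== SOURCE A (Python) =====
-- from operator import itemgetter
--
-- def get_tags_by_month_for_users(data,usernames):
--     '''The function get_tags_by_month_for_users builds a set of unique hashtags
--        grouped by the month in which they are used.
--     '''
--     tags = []
--     for i in range(1, 13):
--         tags.append((i, set()))
--     for index, tag in enumerate(tags):
--         for user_data in data:
--             if user_data[0] in usernames and int(user_data[1]) == tag[0]:
--                 for hashtag in user_data[2]:
--                     tags[index][1].add(hashtag)
--
--     tags = sorted(tags, key=itemgetter(0))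
--
--     return tags
-- ===== SOURCE B (Python) =====
-- def get_tags_by_month_for_users(data, usernames):
--     '''Single pass over data: set of usernames, 12 month buckets indexed directly.'''
--     users = set(usernames)
--     buckets = [set() for _ in range(12)]
--     for name, month, hashtags in data:
--         if name in users and 1 <= month <= 12:
--             buckets[month - 1].update(hashtags)
--     return [(i + 1, s) for i, s in enumerate(buckets)]
-- ===== Notes on version B (the rewrite author's own statement) =====
-- stated objective: faster
-- what changed: Replaces the 12 full scans of data (one per month, each with a linear username list-membership test) by one single pass over data that hashes usernames into a set and indexes the month's bucket directly.
import Mathlib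
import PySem

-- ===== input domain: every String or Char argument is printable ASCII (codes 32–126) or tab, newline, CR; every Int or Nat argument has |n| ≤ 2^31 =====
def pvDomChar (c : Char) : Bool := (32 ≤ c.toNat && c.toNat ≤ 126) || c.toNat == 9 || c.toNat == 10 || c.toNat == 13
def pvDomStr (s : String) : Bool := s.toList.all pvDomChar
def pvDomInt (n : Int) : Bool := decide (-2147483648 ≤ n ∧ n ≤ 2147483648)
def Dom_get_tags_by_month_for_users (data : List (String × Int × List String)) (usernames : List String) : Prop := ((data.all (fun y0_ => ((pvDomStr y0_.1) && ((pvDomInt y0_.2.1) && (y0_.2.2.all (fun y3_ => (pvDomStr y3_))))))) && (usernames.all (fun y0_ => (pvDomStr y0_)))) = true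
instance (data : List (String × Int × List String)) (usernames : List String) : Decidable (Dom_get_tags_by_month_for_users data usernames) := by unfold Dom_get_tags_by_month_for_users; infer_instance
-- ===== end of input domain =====

-- B replaces A's per-month rescans of data by one pass with a username set and direct month indexing (same return value).
-- ===== PORT A =====
def get_tags_by_month_for_users (data : List (String × Int × List String)) (usernames : List String) : List (Int × List String) :=
  let tags : List (Int × List String) :=
    (PySem.List.pyRange 1 13 1).foldl (fun acc i => acc ++ [(i, (PySem.Set.empty : PySem.Set String))]) []
  let tags := (PySem.List.enumerate tags).foldl
    (fun acc it =>
      PySem.List.pySetD acc it.1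
        (it.2.1,
          data.foldl (fun s ud =>
            if ud.1 ∈ usernames ∧ ud.2.1 = it.2.1 then
              ud.2.2.foldl PySem.Set.add s
            else s) it.2.2))
    tags
  PySem.List.sorted tags (fun t => t.1) false

-- ===== PORT B =====
def get_tags_by_month_for_users_alt (data : List (String × Int × List String)) (usernames : List String) : List (Int × List String) :=
  let users : PySem.Set String := PySem.Set.ofList usernames
  let buckets : List (List String) := List.replicate 12 (PySem.Set.empty : PySem.Set String)
  let buckets := data.foldl (fun bs ud =>
    if PySem.Set.contains users ud.1 ∧ 1 ≤ ud.2.1 ∧ ud.2.1 ≤ 12 then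
      bs.modify (ud.2.1 - 1).toNat (fun s => PySem.Set.update s ud.2.2)
    else bs) buckets
  (PySem.List.enumerate buckets).map (fun p => (p.1 + 1, p.2))

-- ===== PRECONDITION & SPEC =====
def Spec_get_tags_by_month_for_users (data : List (String × Int × List String)) (usernames : List String) (out : List (Int × List String)) : Prop := out = get_tags_by_month_for_users_alt data usernames
instance (data : List (String × Int × List String)) (usernames : List String) (out : List (Int × List String)) : Decidable (Spec_get_tags_by_month_for_users data usernames out) := by unfold Spec_get_tags_by_month_for_users; infer_instance

-- ===== CLAIM (what is proved, stated in full; the proofs are below) =====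
def Claim_equal_get_tags_by_month_for_users : Prop := ∀ (data : List (String × Int × List String)) (usernames : List String), Dom_get_tags_by_month_for_users data usernames → Spec_get_tags_by_month_for_users data usernames (get_tags_by_month_for_users data usernames)

-- ===== LEMMAS AND PROOFS =====

-- the per-month set of hashtags: A's inner fold over data for a fixed month m
def pvF (data : List (String × Int × List String)) (usernames : List String) (m : Int) : List String :=
  data.foldl (fun s ud =>
    if ud.1 ∈ usernames ∧ ud.2.1 = m then ud.2.2.foldl PySem.Set.add s else s)
    (PySem.Set.empty : PySem.Set String)

-- A, computed: the concrete skeleton (months 1..12, enumerate, set, sorted) reduces away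
theorem pvA_eq (data : List (String × Int × List String)) (usernames : List String) :
    get_tags_by_month_for_users data usernames =
      [(1, pvF data usernames 1), (2, pvF data usernames 2), (3, pvF data usernames 3),
       (4, pvF data usernames 4), (5, pvF data usernames 5), (6, pvF data usernames 6),
       (7, pvF data usernames 7), (8, pvF data usernames 8), (9, pvF data usernames 9),
       (10, pvF data usernames 10), (11, pvF data usernames 11), (12, pvF data usernames 12)] := by
  simp only [get_tags_by_month_for_users, pvF]
  rw [show (PySem.List.pyRange 1 13 1).foldl
        (fun acc i => acc ++ [(i, (PySem.Set.empty : PySem.Set String))]) [] =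
      [(1, PySem.Set.empty), (2, PySem.Set.empty), (3, PySem.Set.empty), (4, PySem.Set.empty),
       (5, PySem.Set.empty), (6, PySem.Set.empty), (7, PySem.Set.empty), (8, PySem.Set.empty),
       (9, PySem.Set.empty), (10, PySem.Set.empty), (11, PySem.Set.empty), (12, PySem.Set.empty)] from rfl]
  rw [show PySem.List.enumerate
      ([(1, PySem.Set.empty), (2, PySem.Set.empty), (3, PySem.Set.empty), (4, PySem.Set.empty),
        (5, PySem.Set.empty), (6, PySem.Set.empty), (7, PySem.Set.empty), (8, PySem.Set.empty),
        (9, PySem.Set.empty), (10, PySem.Set.empty), (11, PySem.Set.empty),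
        (12, PySem.Set.empty)] : List (Int × PySem.Set String)) =
      [(0, (1, PySem.Set.empty)), (1, (2, PySem.Set.empty)), (2, (3, PySem.Set.empty)),
       (3, (4, PySem.Set.empty)), (4, (5, PySem.Set.empty)), (5, (6, PySem.Set.empty)),
       (6, (7, PySem.Set.empty)), (7, (8, PySem.Set.empty)), (8, (9, PySem.Set.empty)),
       (9, (10, PySem.Set.empty)), (10, (11, PySem.Set.empty)),
       (11, (12, PySem.Set.empty))] from rfl]
  simp only [List.foldl_cons, List.foldl_nil]
  norm_num [PySem.List.pySetD_of_nonneg]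
  rfl

theorem pv_getD_modify (bs : List (List String)) (i j : Nat) (hj : j < bs.length)
    (f : List String → List String) :
    (bs.modify i f).getD j [] = if i = j then f (bs.getD j []) else bs.getD j [] := by
  rw [List.getD_eq_getElem _ [] (by rw [List.length_modify]; exact hj), List.getElem_modify,
      List.getD_eq_getElem bs [] hj]

-- B's one-pass fold: the bucket at index j < 12 holds exactly A's fold for month j+1
theorem pv_bucket_get (usernames : List String) (j : Nat) (hj : j < 12) :
    ∀ (data : List (String × Int × List String)) (bs : List (List String)), bs.length = 12 →
      (data.foldl (fun bs ud =>
        if PySem.Set.contains (PySem.Set.ofList usernames) ud.1 ∧ 1 ≤ ud.2.1 ∧ ud.2.1 ≤ 12 then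
          bs.modify (ud.2.1 - 1).toNat (fun s => PySem.Set.update s ud.2.2)
        else bs) bs)[j]? =
      some (data.foldl (fun s ud =>
        if ud.1 ∈ usernames ∧ ud.2.1 = (j : Int) + 1 then ud.2.2.foldl PySem.Set.add s else s)
        (bs.getD j []))
  | [], bs, h => by
      have hjl : j < bs.length := by omega
      simp [List.foldl_nil, List.getElem?_eq_getElem hjl]
  | ud :: data, bs, h => by
      rw [List.foldl_cons, List.foldl_cons]
      by_cases hc : PySem.Set.contains (PySem.Set.ofList usernames) ud.1 ∧ 1 ≤ ud.2.1 ∧ ud.2.1 ≤ 12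
      · rw [if_pos hc]
        have hmem : ud.1 ∈ usernames :=
          (PySem.Set.mem_ofList usernames ud.1).1 ((PySem.Set.contains_iff _ _).1 hc.1)
        by_cases hij : (ud.2.1 - 1).toNat = j
        · have hm : ud.2.1 = (j : Int) + 1 := by omega
          rw [pv_bucket_get usernames j hj data _ (by rw [List.length_modify]; exact h),
              if_pos ⟨hmem, hm⟩, pv_getD_modify bs _ j (by omega) _, if_pos hij]
          rfl
        · have hm : ¬ (ud.1 ∈ usernames ∧ ud.2.1 = (j : Int) + 1) := by
            rintro ⟨-, hm⟩; exact hij (by omega)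
          rw [pv_bucket_get usernames j hj data _ (by rw [List.length_modify]; exact h),
              if_neg hm, pv_getD_modify bs _ j (by omega) _, if_neg hij]
      · rw [if_neg hc]
        have hm : ¬ (ud.1 ∈ usernames ∧ ud.2.1 = (j : Int) + 1) := by
          rintro ⟨hmem, hm⟩
          exact hc ⟨(PySem.Set.contains_iff _ _).2 ((PySem.Set.mem_ofList usernames ud.1).2 hmem),
            by omega, by omega⟩
        rw [pv_bucket_get usernames j hj data bs h, if_neg hm]

theorem pv_bucket_len (usernames : List String) :
    ∀ (data : List (String × Int × List String)) (bs : List (List String)),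
      (data.foldl (fun bs ud =>
        if PySem.Set.contains (PySem.Set.ofList usernames) ud.1 ∧ 1 ≤ ud.2.1 ∧ ud.2.1 ≤ 12 then
          bs.modify (ud.2.1 - 1).toNat (fun s => PySem.Set.update s ud.2.2)
        else bs) bs).length = bs.length
  | [], bs => rfl
  | ud :: data, bs => by
      rw [List.foldl_cons, pv_bucket_len usernames data]
      split <;> simp [List.length_modify]

-- ===== VERDICT (by name: the statement is the Claim_ definition above) =====
theorem get_tags_by_month_for_users_spec : Claim_equal_get_tags_by_month_for_users := by
  intro data usernames _
  unfold Spec_get_tags_by_month_for_users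
  rw [pvA_eq]
  unfold get_tags_by_month_for_users_alt
  have h12 : (data.foldl (fun bs ud =>
        if PySem.Set.contains (PySem.Set.ofList usernames) ud.1 ∧ 1 ≤ ud.2.1 ∧ ud.2.1 ≤ 12 then
          bs.modify (ud.2.1 - 1).toNat (fun s => PySem.Set.update s ud.2.2)
        else bs) (List.replicate 12 (PySem.Set.empty : PySem.Set String))).length = 12 := by
    rw [pv_bucket_len]; rfl
  apply List.ext_getElem?
  intro n
  rw [List.getElem?_map, PySem.List.getElem?_enumerate]
  by_cases hn : n < 12
  · rw [pv_bucket_get usernames n hn data _ (by rfl)]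
    interval_cases n <;> rfl
  · rw [List.getElem?_eq_none (by norm_num; omega),
        List.getElem?_eq_none (by rw [h12]; omega)]
    rfl
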